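-- pv_equiv track=rewrite | github.com/TheJim123/Projekt-Tomo-vaje | resitve/slovarji.py | pari
-- ===== SOURCE A (Python) =====
-- def ljubljeni(zaljubljeni):
--     return {oseba for x in zaljubljeni for oseba in zaljubljeni[x]}
--
-- def pari(zaljubljeni):
--     parcki = set()
--     for oseba in ljubljeni(zaljubljeni):
--         if zaljubljeni[oseba] == set():
--             pass
--         else:
--             for ljubezen in zaljubljeni[oseba]:
--                 if oseba in zaljubljeni[ljubezen]:
--                     parcki.add((min(oseba, ljubezen), max(oseba,ljubezen)))
--     return parcki
-- ===== SOURCE B (Python) =====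
-- def pari(zaljubljeni):
--     # Count canonical (undirected) edges: each directed love a->b is recorded
--     # under the key (min(a,b), max(a,b)).  A pair is mutual exactly when its
--     # canonical edge was recorded twice (once from each side), or when it is a
--     # self-loop; no reciprocity lookup into zaljubljeni is ever made.
--     obozevani = {b for a in zaljubljeni for b in zaljubljeni[a]}
--     stevec = {}
--     for a in obozevani:
--         for b in zaljubljeni[a]:
--             e = (min(a, b), max(a, b))
--             stevec[e] = stevec.get(e, 0) + 1
--     return {e for e, c in stevec.items() if c == 2 or e[0] == e[1]}
-- ===== Notes on version B (the rewrite author's own statement) =====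
-- stated objective: alternative
-- what changed: B never tests reciprocity: it counts occurrences of each canonical (min,max) edge in one pass and then reads mutuality off the counter (count == 2, or a self-loop), replacing A's membership test 'oseba in zaljubljeni[ljubezen]' by edge counting; Pre_ excludes association lists with duplicate keys or duplicate entries inside a value list (no Python dict-of-sets corresponds to them) and inputs where some loved person is not a key (both A and B raise KeyError there).
import Mathlib
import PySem

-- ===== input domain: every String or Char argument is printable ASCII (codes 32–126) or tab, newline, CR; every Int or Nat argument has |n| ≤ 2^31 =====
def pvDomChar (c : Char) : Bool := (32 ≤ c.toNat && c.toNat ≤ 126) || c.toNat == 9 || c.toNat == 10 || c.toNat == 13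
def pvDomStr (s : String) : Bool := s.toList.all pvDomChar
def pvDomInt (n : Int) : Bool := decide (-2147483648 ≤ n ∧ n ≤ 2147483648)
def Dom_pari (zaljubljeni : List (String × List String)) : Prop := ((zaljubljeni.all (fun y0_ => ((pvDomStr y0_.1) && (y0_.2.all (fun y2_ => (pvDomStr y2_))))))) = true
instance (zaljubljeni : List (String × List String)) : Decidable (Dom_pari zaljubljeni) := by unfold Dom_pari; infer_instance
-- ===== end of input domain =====

-- B replaces A's reciprocity membership test by counting canonical (min,max) edges:
-- a pair is mutual iff its canonical edge is counted twice, or is a self-loop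
-- (objective: alternative algorithm, same cost).

-- shared primitive: zaljubljeni[k] (dict lookup; the KeyError case is excluded by Pre_,
-- so getD's default [] is never reached on admitted inputs)
def pvGet (z : List (String × List String)) (k : String) : List String :=
  PySem.Dict.getD (PySem.Dict.mk z) k []

-- shared helper `ljubljeni` (both sources compute the identical set comprehension)
def pvLoved (z : List (String × List String)) : List String :=
  z.foldl (fun s p => (pvGet z p.1).foldl PySem.Set.add s) PySem.Set.empty

-- ===== PORT A =====
def pari (zaljubljeni : List (String × List String)) : List (String × String) :=
  (pvLoved zaljubljeni).foldl (fun parcki oseba =>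
    if pvGet zaljubljeni oseba = [] then parcki
    else (pvGet zaljubljeni oseba).foldl (fun p lj =>
      if oseba ∈ pvGet zaljubljeni lj then
        PySem.Set.add p (min oseba lj, max oseba lj)
      else p) parcki) PySem.Set.empty

-- ===== PORT B =====
def pari_alt (zaljubljeni : List (String × List String)) : List (String × String) :=
  let stevec :=
    (pvLoved zaljubljeni).foldl (fun d a =>
      (pvGet zaljubljeni a).foldl (fun d b =>
        PySem.Dict.insert d (min a b, max a b)
          (PySem.Dict.getD d (min a b, max a b) 0 + 1)) d)
      (PySem.Dict.empty : PySem.Dict (String × String) Int)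
  stevec.items.foldl (fun r ec =>
    if ec.2 == 2 || ec.1.1 == ec.1.2 then PySem.Set.add r ec.1 else r) PySem.Set.empty

-- ===== PRECONDITION & SPEC =====
-- Pre_ excludes (a) association lists with duplicate keys or with duplicates inside a value
-- list — they represent no Python dict of sets, which is what A receives — and (b) inputs
-- where some person occurring in a value list is not a key: there A raises KeyError
-- (zaljubljeni[oseba]), and B raises it too.
def Pre_pari (zaljubljeni : List (String × List String)) : Prop :=
  (zaljubljeni.map Prod.fst).Nodup ∧
  (∀ p ∈ zaljubljeni, p.2.Nodup) ∧
  ∀ p ∈ zaljubljeni, ∀ b ∈ p.2, b ∈ zaljubljeni.map Prod.fst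
instance (zaljubljeni : List (String × List String)) : Decidable (Pre_pari zaljubljeni) := by
  unfold Pre_pari; infer_instance
def pvWitness_pari : (List (String × List String)) :=
  [("ana", ["bor"]), ("bor", ["ana", "cene"]), ("cene", [])]
def Spec_pari (zaljubljeni : List (String × List String)) (out : List (String × String)) : Prop := out = pari_alt zaljubljeni
instance (zaljubljeni : List (String × List String)) (out : List (String × String)) : Decidable (Spec_pari zaljubljeni out) := by unfold Spec_pari; infer_instance

-- ===== CLAIM (what is proved, stated in full; the proofs are below) =====
def Claim_equal_pari : Prop := ∀ (zaljubljeni : List (String × List String)), Dom_pari zaljubljeni → Pre_pari zaljubljeni → Spec_pari zaljubljeni (pari zaljubljeni)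

-- ===== LEMMAS AND PROOFS =====

-- proof-side vocabulary
def pvCanon (a b : String) : String × String := (min a b, max a b)
def pvCs (z : List (String × List String)) : List (String × String) :=
  (pvLoved z).flatMap (fun a => (pvGet z a).map (pvCanon a))
def pvMut (z : List (String × List String)) (e : String × String) : Bool :=
  decide (e.1 ∈ pvGet z e.2) && decide (e.2 ∈ pvGet z e.1)
def pvQ (z : List (String × List String)) (e : String × String) : Bool :=
  (((pvCs z).count e : Int) == 2) || (e.1 == e.2)

-- fold fusion: a nested loop over pairs equals one loop over the flattened pair list
theorem pv_foldl_flatMap_map {α β γ : Type} (l : List α) (f : α → List β)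
    (step : γ → α → β → γ) (init : γ) :
    l.foldl (fun p a => (f a).foldl (fun p b => step p a b) p) init
      = (l.flatMap (fun a => (f a).map (fun b => (a, b)))).foldl
          (fun p x => step p x.1 x.2) init := by
  induction l generalizing init with
  | nil => rfl
  | cons x xs ih => simp [List.flatMap_cons, List.foldl_append, List.foldl_map, ih]

-- a conditional-add loop is Set.update with the filtered list
theorem pv_foldl_cond_add {α : Type} [BEq α] (q : α → Bool) (l : List α) (s : PySem.Set α) :
    l.foldl (fun p e => if q e then PySem.Set.add p e else p) s
      = PySem.Set.update s (l.filter q) := by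
  induction l generalizing s with
  | nil => rfl
  | cons x xs ih =>
      by_cases h : q x = true <;> simp [h, ih, PySem.Set.update]

theorem pv_mem_update {α : Type} [BEq α] [LawfulBEq α] (s : PySem.Set α) (xs : List α) (y : α) :
    y ∈ PySem.Set.update s xs ↔ y ∈ s ∨ y ∈ xs := by
  induction xs generalizing s with
  | nil => simp [PySem.Set.update]
  | cons x t ih =>
      simp [PySem.Set.update] at ih ⊢
      rw [ih, PySem.Set.mem_add]
      tauto

theorem pv_nodup_update {α : Type} [BEq α] [LawfulBEq α] (s : PySem.Set α) (xs : List α)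
    (h : s.Nodup) : (PySem.Set.update s xs).Nodup := by
  induction xs generalizing s with
  | nil => exact h
  | cons x t ih => exact ih _ (PySem.Set.nodup_add _ _ h)

theorem pv_update_eq_append {α : Type} [BEq α] [LawfulBEq α] (s : PySem.Set α) (xs : List α)
    (h : (s ++ xs).Nodup) : PySem.Set.update s xs = s ++ xs := by
  induction xs generalizing s with
  | nil => simp [PySem.Set.update]
  | cons x t ih =>
      have hx : x ∉ s := by
        intro hm
        exact (List.disjoint_of_nodup_append h) hm (by simp)
      have hadd : PySem.Set.add s x = s ++ [x] := PySem.Set.add_of_not_mem hx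
      show PySem.Set.update (PySem.Set.add s x) t = s ++ x :: t
      rw [hadd, ih (s ++ [x]) (by simpa using h)]
      simp

theorem pv_ofList_self {α : Type} [BEq α] [LawfulBEq α] (l : List α) (h : l.Nodup) :
    PySem.Set.ofList l = l := by
  have := pv_update_eq_append ([] : PySem.Set α) l (by simpa using h)
  simpa [PySem.Set.ofList_eq_foldl, PySem.Set.update] using this

theorem pv_filter_add {α : Type} [BEq α] [LawfulBEq α] (q : α → Bool) (s : PySem.Set α) (x : α) :
    (PySem.Set.add s x).filter q = if q x then PySem.Set.add (s.filter q) x else s.filter q := by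
  by_cases hq : q x = true
  · by_cases hx : x ∈ s
    · have hxf : x ∈ s.filter q := List.mem_filter.mpr ⟨hx, hq⟩
      simp [PySem.Set.add_of_mem hx, PySem.Set.add_of_mem hxf, hq]
    · have hxf : x ∉ s.filter q := fun hm => hx (List.mem_filter.mp hm).1
      simp [PySem.Set.add_of_not_mem hx, PySem.Set.add_of_not_mem hxf, hq, List.filter_append]
  · by_cases hx : x ∈ s
    · simp [PySem.Set.add_of_mem hx, hq]
    · simp [PySem.Set.add_of_not_mem hx, hq, List.filter_append]

theorem pv_filter_update {α : Type} [BEq α] [LawfulBEq α] (q : α → Bool) (s : PySem.Set α)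
    (l : List α) : (PySem.Set.update s l).filter q
      = PySem.Set.update (s.filter q) (l.filter q) := by
  induction l generalizing s with
  | nil => rfl
  | cons x t ih =>
      show (PySem.Set.update (PySem.Set.add s x) t).filter q = _
      rw [ih]
      by_cases hq : q x = true <;> simp [hq, pv_filter_add, PySem.Set.update]

theorem pv_filter_ofList {α : Type} [BEq α] [LawfulBEq α] (q : α → Bool) (l : List α) :
    (PySem.Set.ofList l).filter q = PySem.Set.ofList (l.filter q) := by
  simpa [PySem.Set.ofList_eq_foldl, PySem.Set.update] using
    pv_filter_update q ([] : PySem.Set α) l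

-- dict lookup returns [] or the value list of some entry
theorem pv_pvGet_cases (z : List (String × List String)) (k : String) :
    pvGet z k = [] ∨ ∃ q ∈ z, q.1 = k ∧ pvGet z k = q.2 := by
  unfold pvGet
  cases hf : (z.find? (fun p => p.1 == k)) with
  | none => left; simp [PySem.Dict.getD, PySem.Dict.get?, hf]
  | some p =>
      right
      refine ⟨p, List.mem_of_find?_eq_some hf, ?_, ?_⟩
      · have := List.find?_some hf; simpa using this
      · simp [PySem.Dict.getD, PySem.Dict.get?, hf]

theorem pv_mem_update_loop (z : List (String × List String))
    (l : List (String × List String)) (s : PySem.Set String) (x : String) :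
    x ∈ l.foldl (fun s p => (pvGet z p.1).foldl PySem.Set.add s) s
      ↔ x ∈ s ∨ ∃ p ∈ l, x ∈ pvGet z p.1 := by
  induction l generalizing s with
  | nil => simp
  | cons p t ih =>
      show x ∈ t.foldl _ (PySem.Set.update s (pvGet z p.1)) ↔ _
      rw [ih, pv_mem_update]
      simp only [List.mem_cons]
      constructor
      · rintro ((h | h) | ⟨q, hq, hx⟩)
        · exact Or.inl h
        · exact Or.inr ⟨p, Or.inl rfl, h⟩
        · exact Or.inr ⟨q, Or.inr hq, hx⟩
      · rintro (h | ⟨q, (rfl | hq), hx⟩)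
        · exact Or.inl (Or.inl h)
        · exact Or.inl (Or.inr hx)
        · exact Or.inr ⟨q, hq, hx⟩

theorem pv_mem_pvLoved (z : List (String × List String)) (x : String) :
    x ∈ pvLoved z ↔ ∃ p ∈ z, x ∈ pvGet z p.1 := by
  unfold pvLoved
  rw [pv_mem_update_loop]
  simp [PySem.Set.empty]

theorem pv_nodup_update_loop (z l : List (String × List String)) (s : PySem.Set String)
    (h : s.Nodup) :
    (l.foldl (fun s p => (pvGet z p.1).foldl PySem.Set.add s) s).Nodup := by
  induction l generalizing s with
  | nil => exact h
  | cons p t ih => exact ih _ (pv_nodup_update s (pvGet z p.1) h)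

theorem pv_nodup_pvLoved (z : List (String × List String)) : (pvLoved z).Nodup := by
  unfold pvLoved
  exact pv_nodup_update_loop z z _ List.nodup_nil

theorem pv_mem_loved_of_mem_get (z : List (String × List String)) (u v : String)
    (h : u ∈ pvGet z v) : u ∈ pvLoved z := by
  rcases pv_pvGet_cases z v with hnil | ⟨q, hq, hk, hv⟩
  · rw [hnil] at h; cases h
  · exact (pv_mem_pvLoved z u).mpr ⟨q, hq, by rw [hk]; exact h⟩

theorem pv_nodup_pvGet (z : List (String × List String)) (k : String)
    (hv : ∀ p ∈ z, p.2.Nodup) : (pvGet z k).Nodup := by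
  rcases pv_pvGet_cases z k with hnil | ⟨q, hq, _, hval⟩
  · simp [hnil]
  · rw [hval]; exact hv q hq

-- mutuality of the canonical edge, given one direction
theorem pv_mut_canon (z : List (String × List String)) (a b : String)
    (h : b ∈ pvGet z a) :
    pvMut z (min a b, max a b) = decide (a ∈ pvGet z b) := by
  rcases le_total a b with hab | hab
  · simp [pvMut, min_eq_left hab, max_eq_right hab, h]
  · simp [pvMut, min_eq_right hab, max_eq_left hab, h]

-- sum of a map that vanishes outside two points of a Nodup list
theorem pv_sum_two {α : Type} [DecidableEq α] (l : List α) (g : α → Nat) (u v : α)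
    (hne : u ≠ v) (hnd : l.Nodup)
    (h0 : ∀ x ∈ l, x ≠ u → x ≠ v → g x = 0) :
    (l.map g).sum = (if u ∈ l then g u else 0) + (if v ∈ l then g v else 0) := by
  induction l with
  | nil => simp
  | cons x t ih =>
      rcases List.nodup_cons.mp hnd with ⟨hx, ht⟩
      have ih' := ih ht (fun y hy hyu hyv => h0 y (List.mem_cons_of_mem _ hy) hyu hyv)
      rw [List.map_cons, List.sum_cons, ih']
      by_cases hxu : x = u
      · subst hxu
        have hvm : v ∈ x :: t ↔ v ∈ t := by
          rw [List.mem_cons]; exact or_iff_right (fun h => hne h.symm)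
        rw [if_neg hx, if_pos List.mem_cons_self, if_congr hvm rfl rfl]
        split_ifs <;> omega
      · by_cases hxv : x = v
        · subst hxv
          have hum : u ∈ x :: t ↔ u ∈ t := by
            rw [List.mem_cons]; exact or_iff_right (fun h => hxu h.symm)
          rw [if_neg hx, if_pos List.mem_cons_self, if_congr hum rfl rfl]
          split_ifs <;> omega
        · have hg : g x = 0 := h0 x List.mem_cons_self hxu hxv
          have hum : u ∈ x :: t ↔ u ∈ t := by
            rw [List.mem_cons]; exact or_iff_right (fun h => hxu h.symm)
          have hvm : v ∈ x :: t ↔ v ∈ t := by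
            rw [List.mem_cons]; exact or_iff_right (fun h => hxv h.symm)
          rw [hg, if_congr hum rfl rfl, if_congr hvm rfl rfl]
          split_ifs <;> omega

-- per-source count of a fixed canonical edge (u, v), u ≤ v, u ≠ v
theorem pv_countP_canon_other (z : List (String × List String)) (u v x : String)
    (hxu : x ≠ u) (hxv : x ≠ v) :
    List.count (u, v) ((pvGet z x).map (pvCanon x)) = 0 := by
  rw [List.count_eq_countP, List.countP_map]
  refine List.countP_eq_zero.mpr (fun b _ hb => ?_)
  have hb' : pvCanon x b = (u, v) := by simpa using hb
  rcases le_total x b with hxb | hxb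
  · exact hxu (by simpa [pvCanon, min_eq_left hxb] using congrArg Prod.fst hb')
  · exact hxv (by simpa [pvCanon, max_eq_left hxb] using congrArg Prod.snd hb')

theorem pv_canon_left_iff (u v b : String) (hle : u ≤ v) (hne : u ≠ v) :
    pvCanon u b = (u, v) ↔ b = v := by
  constructor
  · intro h
    obtain ⟨h1, h2⟩ : min u b = u ∧ max u b = v := by
      simpa only [pvCanon, Prod.mk.injEq] using h
    rcases le_total u b with hub | hub
    · rw [max_eq_right hub] at h2; exact h2
    · exfalso
      rw [min_eq_right hub] at h1
      rw [max_eq_left hub] at h2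
      exact hne (h1 ▸ h2)
  · rintro rfl
    simp [pvCanon, min_eq_left hle, max_eq_right hle]

theorem pv_canon_right_iff (u v b : String) (hle : u ≤ v) (hne : u ≠ v) :
    pvCanon v b = (u, v) ↔ b = u := by
  constructor
  · intro h
    obtain ⟨h1, h2⟩ : min v b = u ∧ max v b = v := by
      simpa only [pvCanon, Prod.mk.injEq] using h
    rcases le_total v b with hvb | hvb
    · exfalso; rw [min_eq_left hvb] at h1; exact hne h1.symm
    · rw [min_eq_right hvb] at h1; exact h1
  · rintro rfl
    simp [pvCanon, min_eq_right hle, max_eq_left hle]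

theorem pv_countP_canon_left (z : List (String × List String)) (u v : String)
    (hle : u ≤ v) (hne : u ≠ v) :
    List.count (u, v) ((pvGet z u).map (pvCanon u)) = (pvGet z u).count v := by
  rw [List.count_eq_countP, List.countP_map, List.count_eq_countP]
  refine List.countP_congr (fun b _ => ?_)
  by_cases hbv : b = v
  · simp [Function.comp, hbv, (pv_canon_left_iff u v v hle hne).mpr rfl]
  · have hnc : pvCanon u b ≠ (u, v) := fun hc => hbv ((pv_canon_left_iff u v b hle hne).mp hc)
    simp [Function.comp, hnc, hbv]

theorem pv_countP_canon_right (z : List (String × List String)) (u v : String)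
    (hle : u ≤ v) (hne : u ≠ v) :
    List.count (u, v) ((pvGet z v).map (pvCanon v)) = (pvGet z v).count u := by
  rw [List.count_eq_countP, List.countP_map, List.count_eq_countP]
  refine List.countP_congr (fun b _ => ?_)
  by_cases hbu : b = u
  · simp [Function.comp, hbu, (pv_canon_right_iff u v u hle hne).mpr rfl]
  · have hnc : pvCanon v b ≠ (u, v) := fun hc => hbu ((pv_canon_right_iff u v b hle hne).mp hc)
    simp [Function.comp, hnc, hbu]

-- the counter value of a canonical edge (u, v), u ≤ v, u ≠ v
theorem pv_count_cs (z : List (String × List String)) (u v : String)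
    (hle : u ≤ v) (hne : u ≠ v) :
    (pvCs z).count (u, v)
      = (if u ∈ pvLoved z then (pvGet z u).count v else 0)
      + (if v ∈ pvLoved z then (pvGet z v).count u else 0) := by
  rw [pvCs, List.count_flatMap]
  have hco : (List.count (u, v) ∘ fun a => (pvGet z a).map (pvCanon a))
      = fun x => List.count (u, v) ((pvGet z x).map (pvCanon x)) := rfl
  rw [hco, pv_sum_two (pvLoved z) _ u v hne (pv_nodup_pvLoved z)
    (fun x _ hxu hxv => pv_countP_canon_other z u v x hxu hxv)]
  simp only [pv_countP_canon_left z u v hle hne, pv_countP_canon_right z u v hle hne]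

-- key lemma: on elements of pvCs, the counter criterion equals mutuality
theorem pv_q_eq_mut (z : List (String × List String)) (hv : ∀ p ∈ z, p.2.Nodup)
    (e : String × String) (he : e ∈ pvCs z) : pvQ z e = pvMut z e := by
  obtain ⟨u, v⟩ := e
  obtain ⟨a, ha, b, hb, hab⟩ : ∃ a ∈ pvLoved z, ∃ b ∈ pvGet z a, pvCanon a b = (u, v) := by
    simpa [pvCs] using he
  by_cases hd : u = v
  · subst hd
    obtain ⟨h1, h2⟩ : min a b = u ∧ max a b = u := by
      simpa only [pvCanon, Prod.mk.injEq] using hab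
    have hau : a = u := by
      rcases le_total a b with h | h
      · rw [min_eq_left h] at h1; exact h1
      · rw [max_eq_left h] at h2; exact h2
    have hbu : b = u := by
      rcases le_total a b with h | h
      · rw [max_eq_right h] at h2; exact h2
      · rw [min_eq_right h] at h1; exact h1
    have huu : u ∈ pvGet z u := by rw [hbu, hau] at hb; exact hb
    simp [pvQ, pvMut, huu]
  · have hle : u ≤ v := by
      obtain ⟨h1, h2⟩ : min a b = u ∧ max a b = v := by
        simpa only [pvCanon, Prod.mk.injEq] using hab
      rw [← h1, ← h2]; exact min_le_max
    have hc := pv_count_cs z u v hle hd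
    by_cases h1 : u ∈ pvGet z v <;> by_cases h2 : v ∈ pvGet z u
    · have huS : u ∈ pvLoved z := pv_mem_loved_of_mem_get z u v h1
      have hvS : v ∈ pvLoved z := pv_mem_loved_of_mem_get z v u h2
      have hcv : (pvCs z).count (u, v) = 2 := by
        rw [hc, if_pos huS, if_pos hvS,
          List.count_eq_one_of_mem (pv_nodup_pvGet z u hv) h2,
          List.count_eq_one_of_mem (pv_nodup_pvGet z v hv) h1]
      simp [pvQ, pvMut, hcv, h1, h2]
    · have hcv : (pvCs z).count (u, v) ≤ 1 := by
        rw [hc, List.count_eq_zero_of_not_mem h2]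
        have := List.nodup_iff_count_le_one.mp (pv_nodup_pvGet z v hv) u
        split_ifs <;> omega
      have hne2 : (((pvCs z).count (u, v) : Int) == 2) = false := by
        simp only [beq_eq_false_iff_ne, ne_eq]
        intro h; omega
      simp [pvQ, pvMut, hne2, h2, hd]
    · have hcv : (pvCs z).count (u, v) ≤ 1 := by
        rw [hc, List.count_eq_zero_of_not_mem h1]
        have := List.nodup_iff_count_le_one.mp (pv_nodup_pvGet z u hv) v
        split_ifs <;> omega
      have hne2 : (((pvCs z).count (u, v) : Int) == 2) = false := by
        simp only [beq_eq_false_iff_ne, ne_eq]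
        intro h; omega
      simp [pvQ, pvMut, hne2, h1, hd]
    · have hcv : (pvCs z).count (u, v) ≤ 1 := by
        rw [hc, List.count_eq_zero_of_not_mem h1, List.count_eq_zero_of_not_mem h2]
        split_ifs <;> omega
      have hne2 : (((pvCs z).count (u, v) : Int) == 2) = false := by
        simp only [beq_eq_false_iff_ne, ne_eq]
        intro h; omega
      simp [pvQ, pvMut, hne2, h1, hd]

-- the canonical-edge stream is the flattened, canonicalised pair list
theorem pv_map_canon_pairs (z : List (String × List String)) :
    ((pvLoved z).flatMap (fun a => (pvGet z a).map (fun b => (a, b)))).map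
        (fun x : String × String => (min x.1 x.2, max x.1 x.2)) = pvCs z := by
  simp only [pvCs, List.map_flatMap, List.map_map]
  rfl

-- A's result is the dedup of the mutual canonical edges, in stream order
theorem pv_pari_char (z : List (String × List String)) :
    pari z = PySem.Set.ofList ((pvCs z).filter (pvMut z)) := by
  unfold pari
  have h1 : (fun (parcki : PySem.Set (String × String)) oseba =>
        if pvGet z oseba = [] then parcki
        else (pvGet z oseba).foldl (fun p lj =>
          if oseba ∈ pvGet z lj then PySem.Set.add p (min oseba lj, max oseba lj) else p) parcki)
      = (fun parcki oseba => (pvGet z oseba).foldl (fun p lj =>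
          if oseba ∈ pvGet z lj then PySem.Set.add p (min oseba lj, max oseba lj) else p) parcki) := by
    funext p a
    split_ifs with h
    · rw [h]; rfl
    · rfl
  rw [h1]
  rw [pv_foldl_flatMap_map (pvLoved z) (fun a => pvGet z a)
    (fun p a b => if a ∈ pvGet z b then PySem.Set.add p (min a b, max a b) else p)
    PySem.Set.empty]
  rw [PySem.List.foldl_congr_mem _ _
    (fun p x => if pvMut z (min x.1 x.2, max x.1 x.2) then
      PySem.Set.add p (min x.1 x.2, max x.1 x.2) else p) _
    (fun acc x hx => by
      obtain ⟨a, ha, b, hb, rfl⟩ : ∃ a ∈ pvLoved z, ∃ b ∈ pvGet z a, (a, b) = x := by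
        simpa using hx
      have hm := pv_mut_canon z a b hb
      by_cases hc : a ∈ pvGet z b <;> simp [hc, hm])]
  rw [← List.foldl_map (f := fun x : String × String => (min x.1 x.2, max x.1 x.2))
    (g := fun p e => if pvMut z e then PySem.Set.add p e else p)]
  rw [pv_map_canon_pairs]
  rw [pv_foldl_cond_add]
  simp [PySem.Set.ofList_eq_foldl, PySem.Set.update, PySem.Set.empty]

-- B's result is the dedup of the canonical edges, filtered by the counter criterion
theorem pv_pari_alt_char (z : List (String × List String)) :
    pari_alt z = (PySem.Set.ofList (pvCs z)).filter (pvQ z) := by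
  unfold pari_alt
  rw [pv_foldl_flatMap_map (pvLoved z) (fun a => pvGet z a)
    (fun d a b => PySem.Dict.insert d (min a b, max a b)
      (PySem.Dict.getD d (min a b, max a b) 0 + 1))
    (PySem.Dict.empty : PySem.Dict (String × String) Int)]
  rw [← List.foldl_map (f := fun x : String × String => (min x.1 x.2, max x.1 x.2))
    (g := fun d e => PySem.Dict.insert d e (PySem.Dict.getD d e 0 + 1))]
  rw [pv_map_canon_pairs]
  rw [PySem.Dict.foldl_insert_getD_add_one_eq_counter]
  show ((PySem.Dict.counter (pvCs z)).items).foldl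
      (fun r ec => if ec.2 == 2 || ec.1.1 == ec.1.2 then PySem.Set.add r ec.1 else r)
      PySem.Set.empty
    = (PySem.Set.ofList (pvCs z)).filter (pvQ z)
  rw [PySem.Dict.items_counter]
  rw [List.foldl_map]
  show (PySem.Set.ofList (pvCs z)).foldl
      (fun r k => if pvQ z k then PySem.Set.add r k else r) PySem.Set.empty
    = (PySem.Set.ofList (pvCs z)).filter (pvQ z)
  rw [pv_foldl_cond_add]
  show PySem.Set.ofList ((PySem.Set.ofList (pvCs z)).filter (pvQ z)) = _
  exact pv_ofList_self _ ((PySem.Set.nodup_ofList (pvCs z)).filter (pvQ z))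

-- ===== VERDICT (by name: the statement is the Claim_ definition above) =====
theorem pari_spec : Claim_equal_pari := by
  intro z _ hpre
  show pari z = pari_alt z
  rw [pv_pari_char, pv_pari_alt_char, ← pv_filter_ofList]
  exact (List.filter_congr (fun e he =>
    (pv_q_eq_mut z hpre.2.1 e ((PySem.Set.mem_ofList _ _).mp he)).symm)).symm ▸ rfl
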